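-- pv_equiv track=rewrite | github.com/WallerTsai/OJ-Solution | leetcode-py/图论/遍历/DFS/No3620.py | findMaxPathScore
-- ===== SOURCE A (Python) =====
-- from collections import defaultdict
-- from heapq import heappop, heappush
-- from typing import List
--
-- def findMaxPathScore(edges: List[List[int]], online: List[bool], k: int) -> int:
--     '''
--     最短路 + 二分答案
--     '''
--     # 建图
--     road = defaultdict(list)
--     for x,y,c in edges:
--         # 移除离线点
--         if not online[x] or not online[y]:
--             continue
--         road[x].append((y,c))
--
--     n = len(online)
--     def check(limit):
--         tgt = n - 1
--         heap = [(0,0)]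
--         # 到达这个点的最小总成本
--         dist = {}
--         dist[0] = 0
--         while heap:
--             t,node = heappop(heap)
--             if dist[node] < t:
--                 continue
--
--             if node == tgt:
--                 return True
--
--             for nxt,c in road[node]:
--                 nt = t + c
--                 # 低于限制 或者 超出成本限制
--                 if c < limit or nt > k:
--                     continue
--                 if nxt not in dist or dist[nxt] > nt:
--                     dist[nxt] = nt
--                     heappush(heap,(nt,nxt))
--
--         return False
--
--
--     # 二分答案
--     start = 0
--     end = int(1e9)
--     while start <= end:
--         middle = (start + end) // 2
--         if check(middle):
--             start = middle + 1
--         else: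
--             end = middle - 1
--
--     return start - 1
-- ===== SOURCE B (Python) =====
-- from typing import List
--
-- CAP = 10 ** 9  # problem constraint: edge costs lie within [0, 1e9]; also the search cap A uses
--
--
-- def findMaxPathScore(edges: List[List[int]], online: List[bool], k: int) -> int:
--     '''
--     Sorted-candidate scan + Bellman-Ford-to-fixpoint feasibility:
--     scan the distinct candidate weights from largest to smallest and return the
--     first threshold for which the target is reachable within budget k using
--     only edges of weight >= threshold; -1 if none is.
--     '''
--     adj = []
--     for x, y, c in edges:
--         if online[x] and online[y]:
--             adj.append((x, y, c))
--     n = len(online)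
--
--     def feasible(limit):
--         dist = {0: 0}
--         while True:
--             updated = False
--             for x, y, c in adj:
--                 if c < limit:
--                     continue
--                 if x in dist:
--                     nt = dist[x] + c
--                     if nt <= k and (y not in dist or nt < dist[y]):
--                         dist[y] = nt
--                         updated = True
--             if not updated:
--                 break
--         return n - 1 in dist
--
--     cands = {CAP}
--     for x, y, c in edges:
--         if 0 <= c <= CAP:
--             cands.add(c)
--     for c in sorted(cands, reverse=True):
--         if feasible(c):
--             return c
--     return -1
-- ===== Notes on version B (the rewrite author's own statement) =====
-- stated objective: alternative
-- what changed: Replaces A's binary search over 0..1e9 combined with a heap-based Dijkstra feasibility check by a descending scan of the sorted distinct candidate edge weights whose feasibility test is a Bellman-Ford-style relaxation of a filtered edge list iterated to a fixpoint, returning the first feasible weight (or -1).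
-- outside the precondition, e.g. on findMaxPathScore([[0, 1, -5]], [True, True], 10): A returns -1, B returns -1
import Mathlib
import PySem

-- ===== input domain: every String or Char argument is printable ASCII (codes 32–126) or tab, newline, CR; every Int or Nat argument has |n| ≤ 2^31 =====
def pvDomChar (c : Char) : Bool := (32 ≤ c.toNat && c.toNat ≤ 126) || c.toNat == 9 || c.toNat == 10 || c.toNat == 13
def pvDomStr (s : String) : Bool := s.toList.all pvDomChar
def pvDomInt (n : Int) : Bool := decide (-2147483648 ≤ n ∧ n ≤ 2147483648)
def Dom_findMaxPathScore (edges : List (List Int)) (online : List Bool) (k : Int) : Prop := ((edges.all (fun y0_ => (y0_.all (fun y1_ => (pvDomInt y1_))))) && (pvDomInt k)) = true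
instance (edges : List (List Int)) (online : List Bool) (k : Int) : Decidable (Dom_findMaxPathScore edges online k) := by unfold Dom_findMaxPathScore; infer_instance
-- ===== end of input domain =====

-- B replaces A's binary search + heap Dijkstra by a descending scan of the sorted distinct
-- candidate edge weights whose feasibility test is a Bellman-Ford-style relaxation of a
-- filtered edge list iterated to a fixpoint.

-- ===== PORT A =====

-- Python tuple comparison (t, node) < (t', node') — lexicographic.
def pvLtPair (a b : Int × Int) : Bool := a.1 < b.1 || (a.1 == b.1 && a.2 < b.2)

-- heapq._siftdown, hand-ported step for step (exact: positions are nonnegative ints).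
def pvSiftdown (heap : List (Int × Int)) (startpos pos : Nat) (newitem : Int × Int) :
    List (Int × Int) :=
  if _h : startpos < pos then
    let parentpos := (pos - 1) / 2
    let parent := heap.getD parentpos (0, 0)
    if pvLtPair newitem parent then
      pvSiftdown (heap.set pos parent) startpos parentpos newitem
    else heap.set pos newitem
  else heap.set pos newitem
termination_by pos
decreasing_by have := Nat.div_le_self (pos - 1) 2; omega

-- heapq._siftup, hand-ported step for step (the two branches are Python's childpos choice).
def pvSiftup (heap : List (Int × Int)) (startpos pos : Nat) (newitem : Int × Int) :
    List (Int × Int) :=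
  if h : 2 * pos + 1 < heap.length then
    let childpos := 2 * pos + 1
    if h2 : childpos + 1 < heap.length ∧
        !(pvLtPair (heap.getD childpos (0, 0)) (heap.getD (childpos + 1) (0, 0))) = true then
      pvSiftup (heap.set pos (heap.getD (childpos + 1) (0, 0))) startpos (childpos + 1) newitem
    else
      pvSiftup (heap.set pos (heap.getD childpos (0, 0))) startpos childpos newitem
  else pvSiftdown heap startpos pos newitem
termination_by heap.length - pos
decreasing_by
  · simp only [List.length_set]; omega
  · simp only [List.length_set]; omega

-- heapq.heappush (exact: append then _siftdown(heap, 0, len(heap)-1)).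
def pvHeappush (heap : List (Int × Int)) (item : Int × Int) : List (Int × Int) :=
  pvSiftdown (heap ++ [item]) 0 heap.length item

-- heapq.heappop; none = IndexError on an empty heap.
def pvHeappop? (heap : List (Int × Int)) : Option ((Int × Int) × List (Int × Int)) :=
  match heap.getLast? with
  | none => none
  | some lastelt =>
    match heap.dropLast with
    | [] => some (lastelt, [])
    | r0 :: rs => some (r0, pvSiftup ((r0 :: rs).set 0 lastelt) 0 0 lastelt)

-- the road-building loop of A ('continue' on offline endpoints, short-circuit as in Python).
def pvBuildRoad (edges : List (List Int)) (online : List Bool) :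
    PySem.Dict Int (List (Int × Int)) :=
  edges.foldl (fun road row =>
    match row with
    | [x, y, c] =>
      match PySem.List.pyGet? online x with
      | none => road        -- IndexError: excluded by Pre_
      | some bx =>
        if !bx then road
        else
          match PySem.List.pyGet? online y with
          | none => road    -- IndexError: excluded by Pre_
          | some by' =>
            if !by' then road
            else road.modify x [] (fun adj => adj ++ [(y, c)])  -- road[x].append((y,c))
    | _ => road             -- ValueError on unpacking: excluded by Pre_
    ) PySem.Dict.empty

-- one relaxation step of the inner 'for nxt, c in road[node]' loop.
def pvRelax (k limit t : Int) (s : List (Int × Int) × PySem.Dict Int Int) (yc : Int × Int) :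
    List (Int × Int) × PySem.Dict Int Int :=
  let nt := t + yc.2
  if yc.2 < limit || nt > k then s
  else
    match s.2.get? yc.1 with
    | none => (pvHeappush s.1 (nt, yc.1), s.2.insert yc.1 nt)
    | some dn =>
      if dn > nt then (pvHeappush s.1 (nt, yc.1), s.2.insert yc.1 nt) else s

-- the 'while heap' loop of check; fuel only makes the recursion structural and is
-- proven sufficient on Pre_ inputs (the potential strictly decreases each iteration).
def pvRun (road : PySem.Dict Int (List (Int × Int))) (tgt k limit : Int) :
    Nat → List (Int × Int) → PySem.Dict Int Int → Bool
  | 0, _, _ => false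
  | fuel + 1, heap, dist =>
    match pvHeappop? heap with
    | none => false
    | some ((t, node), heap') =>
      match dist.get? node with
      | none => false   -- KeyError: unreachable, every heap entry's node is keyed
      | some dv =>
        if dv < t then pvRun road tgt k limit fuel heap' dist
        else if node == tgt then true
        else
          let s := (road.getD node []).foldl (pvRelax k limit t) (heap', dist)
          pvRun road tgt k limit fuel s.1 s.2

def pvFuel (edges : List (List Int)) (k : Int) : Nat :=
  (edges.length + 2) * ((max k 0).toNat + 2)

def pvCheck (road : PySem.Dict Int (List (Int × Int))) (n k : Int) (fuel : Nat)
    (limit : Int) : Bool :=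
  pvRun road (n - 1) k limit fuel [((0 : Int), (0 : Int))] (PySem.Dict.empty.insert 0 0)

-- A's 'while start <= end' binary search.
def pvBsearch (road : PySem.Dict Int (List (Int × Int))) (n k : Int) (fuel : Nat)
    (start end_ : Int) : Int :=
  if _h : start ≤ end_ then
    let middle := PySem.Int.floordiv (start + end_) 2
    if pvCheck road n k fuel middle then pvBsearch road n k fuel (middle + 1) end_
    else pvBsearch road n k fuel start (middle - 1)
  else start - 1
termination_by (end_ + 1 - start).toNat
decreasing_by
  · have := PySem.Int.floordiv_two_mid_bounds (lo := start) (hi := end_) (by omega); omega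
  · have := PySem.Int.floordiv_two_mid_bounds (lo := start) (hi := end_) (by omega); omega

def findMaxPathScore (edges : List (List Int)) (online : List Bool) (k : Int) : Int :=
  let road := pvBuildRoad edges online
  pvBsearch road (PySem.List.len online) k (pvFuel edges k) 0 1000000000

-- ===== PORT B =====

-- B's filtered edge list ('if online[x] and online[y]', short-circuit as in Python).
def pvAdj (edges : List (List Int)) (online : List Bool) : List (Int × Int × Int) :=
  edges.foldl (fun adj row =>
    match row with
    | [x, y, c] =>
      match PySem.List.pyGet? online x with
      | none => adj        -- IndexError: excluded by Pre_
      | some bx =>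
        if !bx then adj
        else
          match PySem.List.pyGet? online y with
          | none => adj    -- IndexError: excluded by Pre_
          | some by' => if !by' then adj else adj ++ [(x, y, c)]
    | _ => adj             -- ValueError on unpacking: excluded by Pre_
    ) []

-- one edge relaxation of B's inner 'for x, y, c in adj' loop (flag = Python's 'updated').
def pvStep (k limit : Int) (s : PySem.Dict Int Int × Bool) (e : Int × Int × Int) :
    PySem.Dict Int Int × Bool :=
  if e.2.2 < limit then s
  else
    match s.1.get? e.1 with
    | none => s
    | some dx =>
      if dx + e.2.2 > k then s
      else
        match s.1.get? e.2.1 with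
        | none => (s.1.insert e.2.1 (dx + e.2.2), true)
        | some dy =>
          if dx + e.2.2 < dy then (s.1.insert e.2.1 (dx + e.2.2), true) else s

-- one full pass over the edge list.
def pvRound (adj : List (Int × Int × Int)) (k limit : Int) (dist : PySem.Dict Int Int) :
    PySem.Dict Int Int × Bool :=
  adj.foldl (pvStep k limit) (dist, false)

-- B's 'while True: … if not updated: break'; fuel only makes the loop structural and is
-- proven sufficient on Pre_ inputs (each updating round strictly decreases the potential).
def pvIter (adj : List (Int × Int × Int)) (k limit : Int) :
    Nat → PySem.Dict Int Int → PySem.Dict Int Int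
  | 0, dist => dist
  | fuel + 1, dist =>
    let r := pvRound adj k limit dist
    if r.2 then pvIter adj k limit fuel r.1 else r.1

-- B's feasible(limit): 'n - 1 in dist' at the fixpoint.
def pvFeas (adj : List (Int × Int × Int)) (n k : Int) (fuel : Nat) (limit : Int) : Bool :=
  ((pvIter adj k limit fuel (PySem.Dict.empty.insert 0 0)).get? (n - 1)).isSome

-- B's candidate set: the distinct edge weights in [0, 1e9] plus the cap itself.
def pvCands (edges : List (List Int)) : PySem.Set Int :=
  edges.foldl (fun s row =>
    match row with
    | [_, _, c] => if 0 ≤ c ∧ c ≤ 1000000000 then PySem.Set.add s c else s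
    | _ => s            -- ValueError on unpacking: excluded by Pre_
    ) (PySem.Set.ofList [1000000000])

-- B's 'for c in sorted(cands, reverse=True)' scan with early return.
def pvScanB (adj : List (Int × Int × Int)) (n k : Int) (fuel : Nat) : List Int → Int
  | [] => -1
  | c :: rest => if pvFeas adj n k fuel c then c else pvScanB adj n k fuel rest

def findMaxPathScore_alt (edges : List (List Int)) (online : List Bool) (k : Int) : Int :=
  let adj := pvAdj edges online
  pvScanB adj (PySem.List.len online) k (pvFuel edges k)
    (PySem.List.sorted (pvCands edges) (fun x => x) true)

-- ===== PRECONDITION & SPEC =====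

-- Pre_ keeps exactly the well-formed inputs of the problem domain: every row is a triple
-- [x, y, c] whose index lookups online[x] (and online[y], only when online[x] is truthy —
-- Python's short-circuit) succeed, and whose weight c is nonnegative whenever the edge is
-- actually inserted into the graph.  Malformed rows make A raise (ValueError/IndexError);
-- a negative weight on an inserted edge is outside the problem's domain (costs are >= 1
-- there) and is excluded so that both loop potentials are well founded.
def pvPreRow (online : List Bool) (row : List Int) : Bool :=
  match row with
  | [x, y, c] =>
    match PySem.List.pyGet? online x with
    | none => false
    | some bx =>
      !bx || (match PySem.List.pyGet? online y with
        | none => false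
        | some by' => !by' || decide (0 ≤ c))
  | _ => false

def Pre_findMaxPathScore (edges : List (List Int)) (online : List Bool) (_k : Int) : Prop :=
  edges.all (pvPreRow online) = true

instance (edges : List (List Int)) (online : List Bool) (k : Int) :
    Decidable (Pre_findMaxPathScore edges online k) := by
  unfold Pre_findMaxPathScore; infer_instance

def pvWitness_findMaxPathScore : List (List Int) × List Bool × Int :=
  ([[0, 1, 5]], [true, true], 10)

def Spec_findMaxPathScore (edges : List (List Int)) (online : List Bool) (k : Int)
    (out : Int) : Prop := out = findMaxPathScore_alt edges online k

instance (edges : List (List Int)) (online : List Bool) (k : Int) (out : Int) :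
    Decidable (Spec_findMaxPathScore edges online k out) := by
  unfold Spec_findMaxPathScore; infer_instance

-- ===== CLAIM (what is proved, stated in full; the proofs are below) =====
def Claim_equal_findMaxPathScore : Prop := ∀ (edges : List (List Int)) (online : List Bool) (k : Int), Dom_findMaxPathScore edges online k → Pre_findMaxPathScore edges online k → Spec_findMaxPathScore edges online k (findMaxPathScore edges online k)

-- ===== LEMMAS AND PROOFS =====

theorem pvSetSetPerm (l : List (Int × Int)) (i j : Nat) (x : Int × Int) (hij : i ≠ j)
    (hi : i < l.length) (hj : j < l.length) :
    ((l.set i (l.getD j (0, 0))).set j x).Perm (l.set i x) := by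
  have hgd : l.getD j (0, 0) = l[j] := List.getD_eq_getElem l (0,0) hj
  have hlen : (l.set i l[j]).length = l.length := by simp
  have hj' : j < (l.set i l[j]).length := by omega
  have hAj : (l.set i l[j])[j] = l[j] := by
    rw [List.getElem_set_ne (by omega)]
  have h1 : ((l.set i l[j]).set j x).Perm (x :: (l.set i l[j]).eraseIdx j) :=
    List.set_perm_cons_eraseIdx hj' x
  have h2 : (l[j] :: (l.set i l[j]).eraseIdx j).Perm (l.set i l[j]) := by
    have := List.getElem_cons_eraseIdx_perm (l := l.set i l[j]) (n := j) hj'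
    rwa [hAj] at this
  have h3 : (l.set i l[j]).Perm (l[j] :: l.eraseIdx i) := List.set_perm_cons_eraseIdx hi l[j]
  have h4 : ((l.set i l[j]).eraseIdx j).Perm (l.eraseIdx i) :=
    List.Perm.cons_inv (h2.trans h3)
  have h5 : (l.set i x).Perm (x :: l.eraseIdx i) := List.set_perm_cons_eraseIdx hi x
  rw [hgd]
  exact (h1.trans (h4.cons x)).trans h5.symm

theorem pvSiftdown_perm (heap : List (Int × Int)) (sp pos : Nat) (ni : Int × Int)
    (h : pos < heap.length) : (pvSiftdown heap sp pos ni).Perm (heap.set pos ni) := by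
  fun_induction pvSiftdown heap sp pos ni with
  | case1 heap pos hlt parentpos parent hcmp ih =>
    have hpp : parentpos < pos := by
      have := Nat.div_le_self (pos - 1) 2; omega
    have hlen : (heap.set pos parent).length = heap.length := by simp
    have := ih (by omega)
    exact this.trans (pvSetSetPerm heap pos parentpos ni (by omega) h (by omega))
  | case2 => exact List.Perm.refl _
  | case3 => exact List.Perm.refl _

theorem pvSiftup_perm (heap : List (Int × Int)) (sp pos : Nat) (ni : Int × Int)
    (h : pos < heap.length) : (pvSiftup heap sp pos ni).Perm (heap.set pos ni) := by
  fun_induction pvSiftup heap sp pos ni with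
  | case1 heap pos hlt childpos h2 ih =>
    have hlen : (heap.set pos (heap.getD (childpos + 1) (0,0))).length = heap.length := by simp
    have := ih (by omega)
    exact this.trans (pvSetSetPerm heap pos (childpos + 1) ni (by omega) h (by omega))
  | case2 heap pos hlt childpos h2 ih =>
    have hlen : (heap.set pos (heap.getD childpos (0,0))).length = heap.length := by simp
    have := ih (by omega)
    exact this.trans (pvSetSetPerm heap pos childpos ni (by omega) h (by omega))
  | case3 heap pos hge => exact pvSiftdown_perm heap sp pos ni h

theorem pvHeappush_perm (heap : List (Int × Int)) (item : Int × Int) :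
    (pvHeappush heap item).Perm (item :: heap) := by
  unfold pvHeappush
  have h : heap.length < (heap ++ [item]).length := by simp
  have h1 := pvSiftdown_perm (heap ++ [item]) 0 heap.length item h
  have h2 : (heap ++ [item]).set heap.length item = heap ++ [item] := by
    apply List.ext_getElem (by simp)
    intro n h3 h4
    rcases Nat.lt_trichotomy n heap.length with hn | hn | hn
    · rw [List.getElem_set_ne (by omega)]
    · subst hn; rw [List.getElem_set_self (by omega)]
      simp
    · simp at h3; omega
  rw [h2] at h1
  exact h1.trans (List.perm_append_singleton item heap)

theorem pvHeappop?_eq_none (heap : List (Int × Int)) : pvHeappop? heap = none ↔ heap = [] := by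
  cases heap with
  | nil => simp [pvHeappop?]
  | cons a t =>
    constructor
    · intro h
      exfalso
      unfold pvHeappop? at h
      rw [List.getLast?_eq_some_getLast (l := a :: t) (by simp)] at h
      cases hd : (a :: t).dropLast with
      | nil => rw [hd] at h; cases h
      | cons r0 rs => rw [hd] at h; cases h
    · intro h; cases h

theorem pvHeappop?_perm (heap : List (Int × Int)) (p : Int × Int) (h' : List (Int × Int))
    (h : pvHeappop? heap = some (p, h')) : heap.Perm (p :: h') := by
  unfold pvHeappop? at h
  cases hg : heap.getLast? with
  | none => rw [hg] at h; exact absurd h (by simp)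
  | some lastelt =>
    rw [hg] at h
    have hne : heap ≠ [] := by intro he; subst he; simp at hg
    have hlast : heap.getLast hne = lastelt := by
      rw [List.getLast?_eq_some_getLast hne, Option.some_inj] at hg; exact hg
    have hsplit : heap.dropLast ++ [lastelt] = heap := by
      rw [← hlast]; exact List.dropLast_concat_getLast hne
    cases hd : heap.dropLast with
    | nil =>
      rw [hd] at h
      simp at h
      rw [← hsplit, hd]
      simp [h.1, h.2]
    | cons r0 rs =>
      rw [hd] at h
      simp only [Option.some_inj] at h
      have hp : p = r0 := by cases h; rfl
      have hh' : h' = pvSiftup ((r0 :: rs).set 0 lastelt) 0 0 lastelt := by cases h; rfl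
      have hperm : h'.Perm (lastelt :: rs) := by
        rw [hh']
        have h1 := pvSiftup_perm ((r0 :: rs).set 0 lastelt) 0 0 lastelt (by simp)
        rw [List.set_set] at h1
        simpa using h1
      rw [← hsplit, hd, hp]
      refine List.Perm.trans ?_ (hperm.symm.cons r0)
      show (r0 :: (rs ++ [lastelt])).Perm (r0 :: (lastelt :: rs))
      exact List.Perm.cons r0 (List.perm_append_singleton lastelt rs)

-- the exact reachability that both feasibility tests decide: from node u at accumulated
-- cost d, every used edge has weight ≥ limit and every accumulated cost stays ≤ k.
inductive pvGrow (road : PySem.Dict Int (List (Int × Int))) (k limit : Int) :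
    Int → Int → Int → Int → Prop
  | refl (u d : Int) : pvGrow road k limit u d u d
  | step {u d v e w c : Int} : pvGrow road k limit u d v e → (w, c) ∈ road.getD v [] →
      limit ≤ c → e + c ≤ k → pvGrow road k limit u d w (e + c)

theorem pvGrow_anti (road : PySem.Dict Int (List (Int × Int))) (k limit limit' u d v e : Int)
    (hle : limit' ≤ limit) (h : pvGrow road k limit u d v e) : pvGrow road k limit' u d v e := by
  induction h with
  | refl => exact pvGrow.refl _ _
  | step hgrow hmem hc hk ih => exact pvGrow.step ih hmem (by omega) hk

theorem pvGrow_congr (road : PySem.Dict Int (List (Int × Int))) (k limit limit' u d v e : Int)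
    (hcong : ∀ x p, p ∈ road.getD x [] → (limit ≤ p.2 ↔ limit' ≤ p.2))
    (h : pvGrow road k limit u d v e) : pvGrow road k limit' u d v e := by
  induction h with
  | refl => exact pvGrow.refl _ _
  | step hgrow hmem hc hk ih =>
    exact pvGrow.step ih hmem ((hcong _ _ hmem).mp hc) hk

-- every adjacency entry of the built road comes from an online edge row of the input
theorem pvBuildRoad_mem (edges : List (List Int)) (online : List Bool) (u : Int)
    (p : Int × Int) (hp : p ∈ (pvBuildRoad edges online).getD u []) :
    ∃ x y c, [x, y, c] ∈ edges ∧ p = (y, c) ∧ u = x ∧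
      PySem.List.pyGet? online x = some true ∧ PySem.List.pyGet? online y = some true := by
  suffices H : ∀ (rows : List (List Int)) (d : PySem.Dict Int (List (Int × Int))) (u : Int)
      (p : Int × Int), p ∈ (rows.foldl (fun road row =>
        match row with
        | [x, y, c] =>
          match PySem.List.pyGet? online x with
          | none => road
          | some bx =>
            if !bx then road
            else
              match PySem.List.pyGet? online y with
              | none => road
              | some by' =>
                if !by' then road
                else road.modify x [] (fun adj => adj ++ [(y, c)])
        | _ => road) d).getD u [] →
      p ∈ d.getD u [] ∨ ∃ x y c, [x, y, c] ∈ rows ∧ p = (y, c) ∧ u = x ∧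
        PySem.List.pyGet? online x = some true ∧ PySem.List.pyGet? online y = some true by
    have := H edges PySem.Dict.empty u p hp
    rcases this with h | h
    · simp [PySem.Dict.getD_empty] at h
    · exact h
  intro rows
  induction rows with
  | nil => intro d u p hp; exact Or.inl hp
  | cons row rest ih =>
    intro d u p hp
    simp only [List.foldl_cons] at hp
    have hstep := ih _ u p hp
    rcases hstep with hin | ⟨x, y, c, hr, hpe, hue, hx, hy⟩
    · -- p is already in (step d row); analyse the step
      rcases row with _ | ⟨x, r⟩
      · exact Or.inl hin
      rcases r with _ | ⟨y, r⟩
      · exact Or.inl hin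
      rcases r with _ | ⟨c, r⟩
      · exact Or.inl hin
      rcases r with _ | ⟨z, r⟩
      case cons.cons.cons.cons => exact Or.inl hin
      · simp only at hin
        cases hgx : PySem.List.pyGet? online x with
        | none => rw [hgx] at hin; exact Or.inl hin
        | some bx =>
          rw [hgx] at hin
          cases bx with
          | false => simp at hin; exact Or.inl hin
          | true =>
            simp only [Bool.not_true, Bool.false_eq_true, if_false] at hin
            cases hgy : PySem.List.pyGet? online y with
            | none => rw [hgy] at hin; exact Or.inl hin
            | some by' =>
              rw [hgy] at hin
              cases by' with
              | false => simp at hin; exact Or.inl hin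
              | true =>
                simp only [Bool.not_true, Bool.false_eq_true, if_false] at hin
                rw [PySem.Dict.getD_modify] at hin
                by_cases hux : u = x
                · rw [if_pos hux] at hin
                  rcases List.mem_append.mp hin with h1 | h1
                  · exact Or.inl (hux ▸ h1)
                  · right
                    exact ⟨x, y, c, List.mem_cons_self .., List.mem_singleton.mp h1, hux,
                      by rw [hgx], by rw [hgy]⟩
                · rw [if_neg hux] at hin; exact Or.inl hin
    · exact Or.inr ⟨x, y, c, List.mem_cons_of_mem _ hr, hpe, hue, hx, hy⟩

-- conversely, every online row ends in its source node's adjacency list (the build fold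
-- never removes an existing entry)
theorem pvBuildRoad_mem_rev (edges : List (List Int)) (online : List Bool)
    (x y c : Int) (hrow : [x, y, c] ∈ edges)
    (hx : PySem.List.pyGet? online x = some true)
    (hy : PySem.List.pyGet? online y = some true) :
    (y, c) ∈ (pvBuildRoad edges online).getD x [] := by
  suffices H : ∀ (rows : List (List Int)) (d : PySem.Dict Int (List (Int × Int))),
      ((y, c) ∈ d.getD x [] ∨ [x, y, c] ∈ rows) →
      (y, c) ∈ (rows.foldl (fun road row =>
        match row with
        | [x, y, c] =>
          match PySem.List.pyGet? online x with
          | none => road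
          | some bx =>
            if !bx then road
            else
              match PySem.List.pyGet? online y with
              | none => road
              | some by' =>
                if !by' then road
                else road.modify x [] (fun adj => adj ++ [(y, c)])
        | _ => road) d).getD x [] by
    exact H edges PySem.Dict.empty (Or.inr hrow)
  intro rows
  induction rows with
  | nil =>
    intro d h
    rcases h with h | h
    · exact h
    · cases h
  | cons row rest ih =>
    intro d h
    rw [List.foldl_cons]
    apply ih
    rcases h with hin | hmem
    · left
      rcases row with _ | ⟨a, r⟩
      · exact hin
      rcases r with _ | ⟨b, r⟩
      · exact hin
      rcases r with _ | ⟨w, r⟩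
      · exact hin
      rcases r with _ | ⟨z, r⟩
      case cons.cons.cons.cons => exact hin
      · simp only
        cases hga : PySem.List.pyGet? online a with
        | none => exact hin
        | some ba =>
          cases ba with
          | false => simpa using hin
          | true =>
            simp only [Bool.not_true, Bool.false_eq_true, if_false]
            cases hgb : PySem.List.pyGet? online b with
            | none => exact hin
            | some bb =>
              cases bb with
              | false => simpa using hin
              | true =>
                simp only [Bool.not_true, Bool.false_eq_true, if_false]
                rw [PySem.Dict.getD_modify]
                by_cases hxa : x = a
                · rw [if_pos hxa]
                  exact List.mem_append_left _ (by rw [← hxa]; exact hin)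
                · rw [if_neg hxa]; exact hin
    · rcases List.mem_cons.mp hmem with he | hr
      · left
        rw [← he]
        simp only
        rw [hx]
        simp only [Bool.not_true, Bool.false_eq_true, if_false]
        rw [hy]
        simp only [Bool.not_true, Bool.false_eq_true, if_false]
        rw [PySem.Dict.getD_modify, if_pos rfl]
        exact List.mem_append_right _ (List.mem_singleton.mpr rfl)
      · right; exact hr

-- characterisation of B's filtered edge list
theorem pvAdj_mem (edges : List (List Int)) (online : List Bool) (x y c : Int) :
    (x, y, c) ∈ pvAdj edges online ↔
      [x, y, c] ∈ edges ∧ PySem.List.pyGet? online x = some true ∧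
        PySem.List.pyGet? online y = some true := by
  suffices H : ∀ (rows : List (List Int)) (acc : List (Int × Int × Int)),
      (x, y, c) ∈ rows.foldl (fun adj row =>
        match row with
        | [x, y, c] =>
          match PySem.List.pyGet? online x with
          | none => adj
          | some bx =>
            if !bx then adj
            else
              match PySem.List.pyGet? online y with
              | none => adj
              | some by' => if !by' then adj else adj ++ [(x, y, c)]
        | _ => adj) acc ↔
      (x, y, c) ∈ acc ∨ ([x, y, c] ∈ rows ∧ PySem.List.pyGet? online x = some true ∧
        PySem.List.pyGet? online y = some true) by
    rw [pvAdj, H edges []]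
    simp
  intro rows
  induction rows with
  | nil => intro acc; simp
  | cons row rest ih =>
    intro acc
    rw [List.foldl_cons, ih]
    have htriv : ∀ (acc' : List (Int × Int × Int)), acc' = acc →
        (row ≠ [x, y, c] ∨ ¬ (PySem.List.pyGet? online x = some true ∧
          PySem.List.pyGet? online y = some true)) →
        ((x, y, c) ∈ acc' ∨ ([x, y, c] ∈ rest ∧ PySem.List.pyGet? online x = some true ∧
            PySem.List.pyGet? online y = some true) ↔
          (x, y, c) ∈ acc ∨ ([x, y, c] ∈ row :: rest ∧
            PySem.List.pyGet? online x = some true ∧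
            PySem.List.pyGet? online y = some true)) := by
      intro acc' hacc hne
      subst hacc
      constructor
      · rintro (h | ⟨hm, hs⟩)
        · exact Or.inl h
        · exact Or.inr ⟨List.mem_cons_of_mem _ hm, hs⟩
      · rintro (h | ⟨hm, hs⟩)
        · exact Or.inl h
        · rcases List.mem_cons.mp hm with he | hr
          · rcases hne with hne | hne
            · exact absurd he.symm hne
            · exact absurd hs hne
          · exact Or.inr ⟨hr, hs⟩
    rcases row with _ | ⟨a, r⟩
    · exact htriv acc rfl (Or.inl (by simp))
    rcases r with _ | ⟨b, r⟩
    · exact htriv acc rfl (Or.inl (by simp))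
    rcases r with _ | ⟨w, r⟩
    · exact htriv acc rfl (Or.inl (by simp))
    rcases r with _ | ⟨z, r⟩
    case cons.cons.cons.cons =>
      exact htriv acc rfl (Or.inl (by simp))
    · simp only
      cases hga : PySem.List.pyGet? online a with
      | none =>
        refine htriv acc rfl ?_
        by_cases he : [a, b, w] = [x, y, c]
        · right
          rintro ⟨h1, _⟩
          injection he with e1 e2
          rw [← e1] at h1
          rw [hga] at h1
          cases h1
        · exact Or.inl he
      | some ba =>
        cases ba with
        | false =>
          simp only [Bool.not_false, if_true]
          refine htriv acc rfl ?_
          by_cases he : [a, b, w] = [x, y, c]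
          · right
            rintro ⟨h1, _⟩
            injection he with e1 e2
            rw [← e1] at h1
            rw [hga] at h1
            cases h1
          · exact Or.inl he
        | true =>
          simp only [Bool.not_true, Bool.false_eq_true, if_false]
          cases hgb : PySem.List.pyGet? online b with
          | none =>
            refine htriv acc rfl ?_
            by_cases he : [a, b, w] = [x, y, c]
            · right
              rintro ⟨_, h2⟩
              injection he with e1 e2
              injection e2 with e2 _
              rw [← e2] at h2
              rw [hgb] at h2
              cases h2
            · exact Or.inl he
          | some bb =>
            cases bb with
            | false =>
              simp only [Bool.not_false, if_true]
              refine htriv acc rfl ?_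
              by_cases he : [a, b, w] = [x, y, c]
              · right
                rintro ⟨_, h2⟩
                injection he with e1 e2
                injection e2 with e2 _
                rw [← e2] at h2
                rw [hgb] at h2
                cases h2
              · exact Or.inl he
            | true =>
              simp only [Bool.not_true, Bool.false_eq_true, if_false]
              constructor
              · rintro (h | ⟨hm, hs⟩)
                · rcases List.mem_append.mp h with h | h
                  · exact Or.inl h
                  · have he : (x, y, c) = (a, b, w) := List.mem_singleton.mp h
                    injection he with e1 e2
                    injection e2 with e2 e3
                    subst e1; subst e2; subst e3
                    exact Or.inr ⟨List.mem_cons_self .., hga, hgb⟩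
                · exact Or.inr ⟨List.mem_cons_of_mem _ hm, hs⟩
              · rintro (h | ⟨hm, hs⟩)
                · exact Or.inl (List.mem_append_left _ h)
                · rcases List.mem_cons.mp hm with he | hr
                  · injection he with e1 e2
                    injection e2 with e2 e3
                    injection e3 with e3 _
                    subst e1; subst e2; subst e3
                    exact Or.inl (List.mem_append_right _ (List.mem_singleton.mpr rfl))
                  · exact Or.inr ⟨hr, hs⟩

-- the two adjacency representations carry the same edges
theorem pvAdj_to_road (edges : List (List Int)) (online : List Bool) (x y c : Int)
    (h : (x, y, c) ∈ pvAdj edges online) :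
    (y, c) ∈ (pvBuildRoad edges online).getD x [] := by
  obtain ⟨hrow, hx, hy⟩ := (pvAdj_mem edges online x y c).mp h
  exact pvBuildRoad_mem_rev edges online x y c hrow hx hy

theorem pvRoad_to_adj (edges : List (List Int)) (online : List Bool) (v w c : Int)
    (h : (w, c) ∈ (pvBuildRoad edges online).getD v []) :
    (v, w, c) ∈ pvAdj edges online := by
  obtain ⟨x, y, c', hrow, hpe, hue, hx, hy⟩ := pvBuildRoad_mem edges online v (w, c) h
  injection hpe with e1 e2
  subst hue; subst e1; subst e2
  exact (pvAdj_mem _ _ _ _ _).mpr ⟨hrow, hx, hy⟩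

-- strict decrease of a pointwise-dominated sum at one member
theorem pvSumLt (U : List Int) (f g : Int → Nat) (hle : ∀ v ∈ U, g v ≤ f v) (w : Int)
    (hw : w ∈ U) (hlt : g w < f w) : (U.map g).sum < (U.map f).sum := by
  induction U with
  | nil => cases hw
  | cons a t ih =>
    simp only [List.map_cons, List.sum_cons]
    have hrest : (t.map g).sum ≤ (t.map f).sum :=
      List.sum_le_sum (fun i hi => hle i (List.mem_cons_of_mem a hi))
    rcases List.mem_cons.mp hw with h | h
    · subst h; omega
    · have ha := hle a (List.mem_cons_self ..)
      have := ih (fun v hv => hle v (List.mem_cons_of_mem a hv)) h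
      omega

-- the shared potential: for every candidate node, its current distance (or the cap K
-- when not yet keyed); A adds the heap length on top
def pvPhiF (K : Nat) (dist : PySem.Dict Int Int) (v : Int) : Nat :=
  match dist.get? v with | some d => d.toNat | none => K

def pvPhi (U : List Int) (K : Nat) (heap : List (Int × Int)) (dist : PySem.Dict Int Int) :
    Nat :=
  heap.length + (U.map (pvPhiF K dist)).sum

def pvPhiB (U : List Int) (K : Nat) (dist : PySem.Dict Int Int) : Nat :=
  (U.map (pvPhiF K dist)).sum

-- the loop invariant of check's while-loop
structure pvInv (road : PySem.Dict Int (List (Int × Int))) (k limit tgt : Int) (K : Nat)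
    (heap : List (Int × Int)) (dist : PySem.Dict Int Int) : Prop where
  entries : ∀ p ∈ heap, ∃ du, dist.get? p.2 = some du ∧ du ≤ p.1
  covered : ∀ u du, dist.get? u = some du → ((du, u) ∈ heap ∨
      ∀ q ∈ road.getD u [], limit ≤ q.2 → du + q.2 ≤ k →
        ∃ dv, dist.get? q.1 = some dv ∧ dv ≤ du + q.2)
  tgtE : ∀ dt, dist.get? tgt = some dt → (dt, tgt) ∈ heap
  vals : ∀ u du, dist.get? u = some du → 0 ≤ du ∧ du.toNat < K
  src : ∀ u du, dist.get? u = some du → ∃ e, e ≤ du ∧ pvGrow road k limit 0 0 u e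
  zero : ∃ d0, dist.get? 0 = some d0 ∧ d0 ≤ 0

-- the invariant while the adjacency list of the popped node is being relaxed
structure pvMid (road : PySem.Dict Int (List (Int × Int))) (k limit tgt node t : Int)
    (K : Nat) (done : List (Int × Int)) (heap : List (Int × Int))
    (dist : PySem.Dict Int Int) : Prop where
  entries : ∀ p ∈ heap, ∃ du, dist.get? p.2 = some du ∧ du ≤ p.1
  coveredX : ∀ u du, u ≠ node → dist.get? u = some du → ((du, u) ∈ heap ∨
      ∀ q ∈ road.getD u [], limit ≤ q.2 → du + q.2 ≤ k →
        ∃ dv, dist.get? q.1 = some dv ∧ dv ≤ du + q.2)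
  closedDone : ∀ q ∈ done, limit ≤ q.2 → t + q.2 ≤ k →
      ∃ dv, dist.get? q.1 = some dv ∧ dv ≤ t + q.2
  nodeKey : dist.get? node = some t
  tgtE : ∀ dt, dist.get? tgt = some dt → (dt, tgt) ∈ heap
  vals : ∀ u du, dist.get? u = some du → 0 ≤ du ∧ du.toNat < K
  src : ∀ u du, dist.get? u = some du → ∃ e, e ≤ du ∧ pvGrow road k limit 0 0 u e
  zero : ∃ d0, dist.get? 0 = some d0 ∧ d0 ≤ 0

-- one successful relaxation (fresh key, or strict improvement) keeps pvMid and pays Phi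
theorem pvMidStep (road : PySem.Dict Int (List (Int × Int))) (k limit tgt node t : Int)
    (K : Nat) (U : List Int)
    (hW : ∀ u q, q ∈ road.getD u [] → 0 ≤ q.2)
    (hU : ∀ u q, q ∈ road.getD u [] → q.1 ∈ U)
    (hK : (max k 0).toNat < K)
    (done todo' : List (Int × Int)) (nxt c : Int)
    (hadj : road.getD node [] = done ++ (nxt, c) :: todo')
    (heap : List (Int × Int)) (dist : PySem.Dict Int Int)
    (hm : pvMid road k limit tgt node t K done heap dist)
    (hcl : limit ≤ c) (hck : t + c ≤ k)
    (himp : ∀ dn, dist.get? nxt = some dn → t + c < dn) :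
    pvMid road k limit tgt node t K (done ++ [(nxt, c)])
        (pvHeappush heap (t + c, nxt)) (dist.insert nxt (t + c)) ∧
      pvPhi U K (pvHeappush heap (t + c, nxt)) (dist.insert nxt (t + c)) ≤
        pvPhi U K heap dist := by
  have hmem : (nxt, c) ∈ road.getD node [] := by rw [hadj]; simp
  have hc0 : 0 ≤ c := hW node (nxt, c) hmem
  have ht0 : 0 ≤ t := (hm.vals node t hm.nodeKey).1
  have hnt0 : 0 ≤ t + c := by omega
  have hmemP : ∀ a, a ∈ pvHeappush heap (t + c, nxt) ↔ a = (t + c, nxt) ∨ a ∈ heap := by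
    intro a
    rw [(pvHeappush_perm heap (t + c, nxt)).mem_iff]
    simp
  have hget : ∀ w, (dist.insert nxt (t + c)).get? w =
      if w = nxt then some (t + c) else dist.get? w := fun w => PySem.Dict.get?_insert dist nxt w (t + c)
  have hnn : node ≠ nxt := by
    intro he
    have := himp t (he ▸ hm.nodeKey)
    omega
  have hz0 : nxt ≠ 0 := by
    obtain ⟨d0, hd0, hle0⟩ := hm.zero
    intro he
    have := himp d0 (he ▸ hd0)
    omega
  have hwit : ∀ (w dv bound : Int), dist.get? w = some dv → dv ≤ bound →
      ∃ dv', (dist.insert nxt (t + c)).get? w = some dv' ∧ dv' ≤ bound := by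
    intro w dv bound hw hb
    rw [hget w]
    by_cases hwn : w = nxt
    · subst hwn
      exact ⟨t + c, by simp, le_trans (le_of_lt (himp dv hw)) hb⟩
    · exact ⟨dv, by rw [if_neg hwn]; exact hw, hb⟩
  refine ⟨⟨?_, ?_, ?_, ?_, ?_, ?_, ?_, ?_⟩, ?_⟩
  · -- entries
    intro p hp
    rcases (hmemP p).mp hp with he | hin
    · subst he; exact ⟨t + c, by rw [hget]; simp, le_refl _⟩
    · obtain ⟨du, hdu, hle⟩ := hm.entries p hin
      exact hwit p.2 du p.1 hdu hle
  · -- coveredX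
    intro u du hun hu
    rw [hget u] at hu
    by_cases hunxt : u = nxt
    · subst hunxt
      rw [if_pos rfl] at hu
      injection hu with hdu
      left
      rw [hmemP]
      left
      rw [← hdu]
    · rw [if_neg hunxt] at hu
      rcases hm.coveredX u du hun hu with hin | hcl'
      · left; exact (hmemP _).mpr (Or.inr hin)
      · right
        intro q hq hql hqk
        obtain ⟨dv, hdv, hdvle⟩ := hcl' q hq hql hqk
        exact hwit q.1 dv _ hdv hdvle
  · -- closedDone
    intro q hq hql hqk
    rcases List.mem_append.mp hq with hqd | hqn
    · obtain ⟨dv, hdv, hdvle⟩ := hm.closedDone q hqd hql hqk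
      exact hwit q.1 dv _ hdv hdvle
    · have : q = (nxt, c) := List.mem_singleton.mp hqn
      subst this
      exact ⟨t + c, by rw [hget]; simp, le_refl _⟩
  · -- nodeKey
    rw [hget, if_neg hnn]; exact hm.nodeKey
  · -- tgtE
    intro dt ht
    rw [hget] at ht
    by_cases htn : tgt = nxt
    · subst htn
      rw [if_pos rfl] at ht
      injection ht with hdt
      exact (hmemP _).mpr (Or.inl (by rw [hdt]))
    · rw [if_neg htn] at ht
      exact (hmemP _).mpr (Or.inr (hm.tgtE dt ht))
  · -- vals
    intro u du hu
    rw [hget] at hu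
    by_cases hunxt : u = nxt
    · rw [if_pos hunxt] at hu
      injection hu with hdu
      subst hdu
      refine ⟨hnt0, ?_⟩
      have h1 : (t + c).toNat ≤ (max k 0).toNat := Int.toNat_le_toNat (by omega)
      omega
    · rw [if_neg hunxt] at hu
      exact hm.vals u du hu
  · -- src
    intro u du hu
    rw [hget] at hu
    by_cases hunxt : u = nxt
    · rw [if_pos hunxt] at hu
      injection hu with hdu
      subst hunxt hdu
      obtain ⟨e, hle, hg⟩ := hm.src node t hm.nodeKey
      exact ⟨e + c, by omega, pvGrow.step hg hmem hcl (by omega)⟩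
    · rw [if_neg hunxt] at hu
      exact hm.src u du hu
  · -- zero
    obtain ⟨d0, hd0, hle0⟩ := hm.zero
    exact ⟨d0, by rw [hget, if_neg (Ne.symm hz0)]; exact hd0, hle0⟩
  · -- Phi
    have hlen : (pvHeappush heap (t + c, nxt)).length = heap.length + 1 := by
      have := (pvHeappush_perm heap (t + c, nxt)).length_eq
      simpa using this
    have hsum : ((U.map (pvPhiF K (dist.insert nxt (t + c)))).sum) <
        ((U.map (pvPhiF K dist)).sum) := by
      apply pvSumLt _ _ _ ?_ nxt (hU node (nxt, c) hmem) ?_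
      · intro v hv
        unfold pvPhiF
        rw [hget v]
        by_cases hvn : v = nxt
        · rw [if_pos hvn, hvn]
          cases hdv : dist.get? nxt with
          | none =>
            show (t + c).toNat ≤ K
            have h1 : (t + c).toNat ≤ (max k 0).toNat := Int.toNat_le_toNat (by omega)
            omega
          | some dn =>
            show (t + c).toNat ≤ dn.toNat
            exact Int.toNat_le_toNat (le_of_lt (himp dn hdv))
        · rw [if_neg hvn]
      · unfold pvPhiF
        rw [hget nxt, if_pos rfl]
        cases hdv : dist.get? nxt with
        | none =>
          show (t + c).toNat < K
          have h1 : (t + c).toNat ≤ (max k 0).toNat := Int.toNat_le_toNat (by omega)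
          omega
        | some dn =>
          show (t + c).toNat < dn.toNat
          have := himp dn hdv
          omega
    unfold pvPhi
    show (pvHeappush heap (t + c, nxt)).length +
        (U.map (pvPhiF K (dist.insert nxt (t + c)))).sum ≤
      heap.length + (U.map (pvPhiF K dist)).sum
    omega
-- relaxing the whole adjacency list preserves pvMid and never increases the potential
theorem pvFold (road : PySem.Dict Int (List (Int × Int))) (k limit tgt node t : Int)
    (K : Nat) (U : List Int)
    (hW : ∀ u q, q ∈ road.getD u [] → 0 ≤ q.2)
    (hU : ∀ u q, q ∈ road.getD u [] → q.1 ∈ U)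
    (hK : (max k 0).toNat < K) :
    ∀ (todo done : List (Int × Int)) (heap : List (Int × Int)) (dist : PySem.Dict Int Int),
      road.getD node [] = done ++ todo →
      pvMid road k limit tgt node t K done heap dist →
      pvMid road k limit tgt node t K (done ++ todo)
          (todo.foldl (pvRelax k limit t) (heap, dist)).1
          (todo.foldl (pvRelax k limit t) (heap, dist)).2 ∧
        pvPhi U K (todo.foldl (pvRelax k limit t) (heap, dist)).1
          (todo.foldl (pvRelax k limit t) (heap, dist)).2 ≤ pvPhi U K heap dist := by
  intro todo
  induction todo with
  | nil =>
    intro done heap dist hadj hm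
    constructor
    · simpa using hm
    · exact le_refl _
  | cons q todo' ih =>
    intro done heap dist hadj hm
    obtain ⟨nxt, c⟩ := q
    have hadj' : road.getD node [] = (done ++ [(nxt, c)]) ++ todo' := by
      rw [hadj]; simp
    have happ : done ++ (nxt, c) :: todo' = (done ++ [(nxt, c)]) ++ todo' := by simp
    rw [happ, List.foldl_cons]
    by_cases h1 : c < limit
    · -- skipped edge: weight below the threshold
      have hs : pvRelax k limit t (heap, dist) (nxt, c) = (heap, dist) := by
        simp [pvRelax, h1]
      rw [hs]
      apply ih (done ++ [(nxt, c)]) heap dist hadj'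
      refine ⟨hm.entries, hm.coveredX, ?_, hm.nodeKey, hm.tgtE, hm.vals, hm.src, hm.zero⟩
      intro q hq hql hqk
      rcases List.mem_append.mp hq with hqd | hqn
      · exact hm.closedDone q hqd hql hqk
      · have : q = (nxt, c) := List.mem_singleton.mp hqn
        subst this; simp only at hql; omega
    · by_cases h2 : t + c > k
      · -- skipped edge: accumulated cost above the budget
        have hs : pvRelax k limit t (heap, dist) (nxt, c) = (heap, dist) := by
          simp [pvRelax, h1, h2]
        rw [hs]
        apply ih (done ++ [(nxt, c)]) heap dist hadj'
        refine ⟨hm.entries, hm.coveredX, ?_, hm.nodeKey, hm.tgtE, hm.vals, hm.src, hm.zero⟩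
        intro q hq hql hqk
        rcases List.mem_append.mp hq with hqd | hqn
        · exact hm.closedDone q hqd hql hqk
        · have : q = (nxt, c) := List.mem_singleton.mp hqn
          subst this; simp only at hqk; omega
      · cases hdn : dist.get? nxt with
        | none =>
          have hs : pvRelax k limit t (heap, dist) (nxt, c) =
              (pvHeappush heap (t + c, nxt), dist.insert nxt (t + c)) := by
            simp [pvRelax, h1, h2, hdn]
          rw [hs]
          have hstep := pvMidStep road k limit tgt node t K U hW hU hK done todo' nxt c
            hadj heap dist hm (by omega) (by omega)
            (fun dn hdn' => by rw [hdn] at hdn'; cases hdn')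
          obtain ⟨hm', hphi⟩ := hstep
          have := ih (done ++ [(nxt, c)]) _ _ hadj' hm'
          exact ⟨this.1, le_trans this.2 hphi⟩
        | some dn =>
          by_cases h3 : dn > t + c
          · have hs : pvRelax k limit t (heap, dist) (nxt, c) =
                (pvHeappush heap (t + c, nxt), dist.insert nxt (t + c)) := by
              simp [pvRelax, h1, h2, hdn, h3]
            rw [hs]
            have hstep := pvMidStep road k limit tgt node t K U hW hU hK done todo' nxt c
              hadj heap dist hm (by omega) (by omega)
              (fun dn' hdn' => by rw [hdn] at hdn'; injection hdn' with h; omega)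
            obtain ⟨hm', hphi⟩ := hstep
            have := ih (done ++ [(nxt, c)]) _ _ hadj' hm'
            exact ⟨this.1, le_trans this.2 hphi⟩
          · -- no improvement: state unchanged, the existing key witnesses closedness
            have hs : pvRelax k limit t (heap, dist) (nxt, c) = (heap, dist) := by
              simp [pvRelax, h1, h2, hdn, h3]
            rw [hs]
            apply ih (done ++ [(nxt, c)]) heap dist hadj'
            refine ⟨hm.entries, hm.coveredX, ?_, hm.nodeKey, hm.tgtE, hm.vals, hm.src, hm.zero⟩
            intro q hq hql hqk
            rcases List.mem_append.mp hq with hqd | hqn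
            · exact hm.closedDone q hqd hql hqk
            · have : q = (nxt, c) := List.mem_singleton.mp hqn
              subst this
              exact ⟨dn, hdn, by omega⟩

-- the main characterisation: with the invariant and enough fuel, the while-loop returns
-- true exactly when the target is reachable within budget above the threshold
theorem pvRun_iff (road : PySem.Dict Int (List (Int × Int))) (k limit tgt : Int)
    (U : List Int) (K : Nat)
    (hW : ∀ u q, q ∈ road.getD u [] → 0 ≤ q.2)
    (hU : ∀ u q, q ∈ road.getD u [] → q.1 ∈ U)
    (hK : (max k 0).toNat < K) :
    ∀ (fuel : Nat) (heap : List (Int × Int)) (dist : PySem.Dict Int Int),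
      pvInv road k limit tgt K heap dist → pvPhi U K heap dist < fuel →
      (pvRun road tgt k limit fuel heap dist = true ↔ ∃ e, pvGrow road k limit 0 0 tgt e) := by
  intro fuel
  induction fuel with
  | zero => intro heap dist hinv hphi; exact absurd hphi (by omega)
  | succ fuel ih =>
    intro heap dist hinv hphi
    rw [pvRun]
    cases hpop : pvHeappop? heap with
    | none =>
      -- heap exhausted: the distance map is closed, so reachable targets would be keyed
      have hnil : heap = [] := (pvHeappop?_eq_none heap).mp hpop
      subst hnil
      simp only [Bool.false_eq_true, false_iff]
      rintro ⟨e, hg⟩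
      have hkeyed : ∀ v e', pvGrow road k limit 0 0 v e' →
          ∃ dv, dist.get? v = some dv ∧ dv ≤ e' := by
        intro v e' hg'
        induction hg' with
        | refl =>
          obtain ⟨d0, hd0, hle⟩ := hinv.zero
          exact ⟨d0, hd0, hle⟩
        | step hgrow hmem hc hk ihg =>
          obtain ⟨dv, hdv, hdvle⟩ := ihg
          rcases hinv.covered _ _ hdv with hin | hclosed
          · cases hin
          · obtain ⟨dw, hdw, hdwle⟩ := hclosed _ hmem hc (by omega)
            exact ⟨dw, hdw, by omega⟩
      obtain ⟨dt, hdt, _⟩ := hkeyed tgt e hg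
      exact absurd (hinv.tgtE dt hdt) (by simp)
    | some pr =>
      obtain ⟨⟨t, node⟩, heap'⟩ := pr
      dsimp only
      have hperm : heap.Perm ((t, node) :: heap') := pvHeappop?_perm heap _ _ hpop
      have hmemh : (t, node) ∈ heap := hperm.mem_iff.mpr (by simp)
      obtain ⟨dv0, hdv0, hdv0le⟩ := hinv.entries (t, node) hmemh
      dsimp only at hdv0 hdv0le
      rw [hdv0]
      dsimp only
      have hlen : heap.length = heap'.length + 1 := by simpa using hperm.length_eq
      by_cases hst : dv0 < t
      · -- stale entry
        rw [if_pos hst]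
        apply ih heap' dist ?_ ?_
        · refine ⟨?_, ?_, ?_, hinv.vals, hinv.src, hinv.zero⟩
          · intro p hp
            exact hinv.entries p (hperm.mem_iff.mpr (List.mem_cons_of_mem _ hp))
          · intro u du hdu
            rcases hinv.covered u du hdu with hin | hcl
            · left
              rcases List.mem_cons.mp (hperm.mem_iff.mp hin) with he | hh
              · exfalso
                have h1 : u = node ∧ du = t := by
                  constructor <;> [exact congrArg Prod.snd he; exact congrArg Prod.fst he]
                rw [h1.1] at hdu
                rw [hdv0] at hdu
                injection hdu with h2
                omega
              · exact hh
            · exact Or.inr hcl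
          · intro dt hdt
            rcases List.mem_cons.mp (hperm.mem_iff.mp (hinv.tgtE dt hdt)) with he | hh
            · exfalso
              have h1 : tgt = node ∧ dt = t := by
                constructor <;> [exact congrArg Prod.snd he; exact congrArg Prod.fst he]
              rw [h1.1] at hdt
              rw [hdv0] at hdt
              injection hdt with h2
              omega
            · exact hh
        · unfold pvPhi at hphi ⊢
          omega
      · rw [if_neg hst]
        have ht : dv0 = t := le_antisymm hdv0le (by omega)
        subst ht
        by_cases htgt : node = tgt
        · rw [if_pos (by simpa using htgt)]
          simp only [true_iff]
          obtain ⟨e, hle, hg⟩ := hinv.src node dv0 hdv0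
          exact ⟨e, htgt ▸ hg⟩
        · rw [if_neg (by simpa using htgt)]
          have hmid : pvMid road k limit tgt node dv0 K [] heap' dist := by
            refine ⟨?_, ?_, by simp, hdv0, ?_, hinv.vals, hinv.src, hinv.zero⟩
            · intro p hp
              exact hinv.entries p (hperm.mem_iff.mpr (List.mem_cons_of_mem _ hp))
            · intro u du hun hdu
              rcases hinv.covered u du hdu with hin | hcl
              · left
                rcases List.mem_cons.mp (hperm.mem_iff.mp hin) with he | hh
                · exfalso
                  exact hun (congrArg Prod.snd he)
                · exact hh
              · exact Or.inr hcl
            · intro dt hdt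
              rcases List.mem_cons.mp (hperm.mem_iff.mp (hinv.tgtE dt hdt)) with he | hh
              · exfalso
                apply htgt
                have h2 := congrArg Prod.snd he
                simpa using h2.symm
              · exact hh
          have hfold := pvFold road k limit tgt node dv0 K U hW hU hK
            (road.getD node []) [] heap' dist (by simp) hmid
          obtain ⟨hm', hphi'⟩ := hfold
          apply ih _ _ ?_ ?_
          · refine ⟨hm'.entries, ?_, hm'.tgtE, hm'.vals, hm'.src, hm'.zero⟩
            intro u du hdu
            by_cases hun : u = node
            · subst hun
              have : du = dv0 := by
                rw [hm'.nodeKey] at hdu; injection hdu with h; omega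
              subst this
              right
              intro q hq hql hqk
              exact hm'.closedDone q (by simpa using hq) hql hqk
            · exact hm'.coveredX u du hun hdu
          · have : pvPhi U K heap' dist + 1 ≤ pvPhi U K heap dist := by
              unfold pvPhi; omega
            omega
-- target ids of all well-formed rows: a superset of the nodes the relaxation can key
def pvTargets (edges : List (List Int)) : List Int :=
  edges.filterMap (fun row => match row with | [_, y, _] => some y | _ => none)

-- weights of road edges are nonnegative on Pre_ inputs
theorem pvRoadW (edges : List (List Int)) (online : List Bool) (k : Int)
    (hpre : Pre_findMaxPathScore edges online k) :
    ∀ u q, q ∈ (pvBuildRoad edges online).getD u [] → 0 ≤ q.2 := by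
  intro u q hq
  obtain ⟨x, y, c, hrow, hpe, _, hx, hy⟩ := pvBuildRoad_mem edges online u q hq
  have hall := List.all_eq_true.mp hpre _ hrow
  unfold pvPreRow at hall
  dsimp only at hall
  rw [hx, hy] at hall
  simp at hall
  subst hpe
  exact hall

theorem pvRoadU (edges : List (List Int)) (online : List Bool) :
    ∀ u q, q ∈ (pvBuildRoad edges online).getD u [] → q.1 ∈ 0 :: pvTargets edges := by
  intro u q hq
  obtain ⟨x, y, c, hrow, hpe, _, _, _⟩ := pvBuildRoad_mem edges online u q hq
  right
  subst hpe
  exact List.mem_filterMap.mpr ⟨[x, y, c], hrow, rfl⟩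

-- check decides reachability (any limit, on Pre_ inputs)
theorem pvCheck_iff (edges : List (List Int)) (online : List Bool) (k limit : Int)
    (hpre : Pre_findMaxPathScore edges online k) :
    (pvCheck (pvBuildRoad edges online) (PySem.List.len online) k (pvFuel edges k) limit
        = true) ↔
      ∃ e, pvGrow (pvBuildRoad edges online) k limit 0 0 (PySem.List.len online - 1) e := by
  have hK : (max k 0).toNat < (max k 0).toNat + 1 := Nat.lt_succ_self _
  set road := pvBuildRoad edges online with hroad
  set U : List Int := 0 :: pvTargets edges with hUdef
  set K : Nat := (max k 0).toNat + 1 with hKdef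
  have hget0 : ∀ v : Int, (PySem.Dict.empty.insert (0 : Int) (0 : Int)).get? v =
      if v = 0 then some 0 else none := by
    intro v
    rw [PySem.Dict.get?_insert]
    by_cases hv : v = 0
    · rw [if_pos hv, if_pos hv]
    · rw [if_neg hv, if_neg hv, PySem.Dict.get?_empty]
  have hinv : pvInv road k limit (PySem.List.len online - 1) K
      [((0 : Int), (0 : Int))] (PySem.Dict.empty.insert 0 0) := by
    refine ⟨?_, ?_, ?_, ?_, ?_, ?_⟩
    · intro p hp
      have : p = (0, 0) := by simpa using hp
      subst this
      rw [hget0]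
      exact ⟨0, by simp, le_refl _⟩
    · intro u du hu
      rw [hget0] at hu
      by_cases hu0 : u = 0
      · rw [if_pos hu0] at hu
        injection hu with h
        subst hu0 h
        left; simp
      · rw [if_neg hu0] at hu; cases hu
    · intro dt ht
      rw [hget0] at ht
      by_cases h0 : PySem.List.len online - 1 = 0
      · rw [if_pos h0] at ht
        injection ht with h
        subst h
        simp only [List.mem_singleton, Prod.mk.injEq]
        exact ⟨trivial, h0⟩
      · rw [if_neg h0] at ht; cases ht
    · intro u du hu
      rw [hget0] at hu
      by_cases hu0 : u = 0
      · rw [if_pos hu0] at hu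
        injection hu with h
        subst h
        exact ⟨le_refl _, by omega⟩
      · rw [if_neg hu0] at hu; cases hu
    · intro u du hu
      rw [hget0] at hu
      by_cases hu0 : u = 0
      · rw [if_pos hu0] at hu
        injection hu with h
        subst hu0 h
        exact ⟨0, le_refl _, pvGrow.refl 0 0⟩
      · rw [if_neg hu0] at hu; cases hu
    · exact ⟨0, by rw [hget0]; simp, le_refl _⟩
  have hphi : pvPhi U K [((0 : Int), (0 : Int))] (PySem.Dict.empty.insert 0 0) <
      pvFuel edges k := by
    unfold pvPhi
    have hterm : ∀ x ∈ U.map (pvPhiF K (PySem.Dict.empty.insert 0 0)), x ≤ K := by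
      intro x hx
      obtain ⟨v, _, rfl⟩ := List.mem_map.mp hx
      unfold pvPhiF
      rw [hget0]
      by_cases hv : v = 0
      · rw [if_pos hv]; simp
      · rw [if_neg hv]
    have hsum := List.sum_le_card_nsmul _ K hterm
    rw [List.length_map] at hsum
    have hUlen : U.length ≤ edges.length + 1 := by
      have := List.length_filterMap_le
        (fun row => match row with | [_, y, _] => some y | _ => none) edges
      simp only [hUdef, List.length_cons]
      unfold pvTargets
      omega
    have hfuel : pvFuel edges k = (edges.length + 2) * (K + 1) := by
      unfold pvFuel; rw [hKdef]
    have he1 : (edges.length + 2) * (K + 1) = (edges.length + 1) * K + K + edges.length + 2 := by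
      ring
    have hsum2 : (U.map (pvPhiF K (PySem.Dict.empty.insert 0 0))).sum ≤ (edges.length + 1) * K := by
      calc (U.map (pvPhiF K (PySem.Dict.empty.insert 0 0))).sum ≤ U.length • K := hsum
        _ = U.length * K := smul_eq_mul _ _
        _ ≤ (edges.length + 1) * K := Nat.mul_le_mul_right K hUlen
    rw [hfuel, he1]
    simp only [List.length_singleton]
    omega
  have := pvRun_iff road k limit (PySem.List.len online - 1) U K
    (pvRoadW edges online k hpre) (pvRoadU edges online) hK
    (pvFuel edges k) [((0 : Int), (0 : Int))] (PySem.Dict.empty.insert 0 0) hinv hphi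
  exact this

-- antitone: a smaller threshold only admits more edges
theorem pvCheck_anti (edges : List (List Int)) (online : List Bool) (k m m' : Int)
    (hpre : Pre_findMaxPathScore edges online k) (hle : m' ≤ m)
    (h : pvCheck (pvBuildRoad edges online) (PySem.List.len online) k (pvFuel edges k) m
      = true) :
    pvCheck (pvBuildRoad edges online) (PySem.List.len online) k (pvFuel edges k) m'
      = true := by
  rw [pvCheck_iff edges online k m hpre] at h
  rw [pvCheck_iff edges online k m' hpre]
  obtain ⟨e, hg⟩ := h
  exact ⟨e, pvGrow_anti _ k m m' 0 0 _ e hle hg⟩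

-- check only looks at the threshold through comparisons with present road weights
theorem pvCheck_congr (edges : List (List Int)) (online : List Bool) (k m1 m2 : Int)
    (hpre : Pre_findMaxPathScore edges online k)
    (hcong : ∀ u q, q ∈ (pvBuildRoad edges online).getD u [] → (m1 ≤ q.2 ↔ m2 ≤ q.2)) :
    pvCheck (pvBuildRoad edges online) (PySem.List.len online) k (pvFuel edges k) m1 =
      pvCheck (pvBuildRoad edges online) (PySem.List.len online) k (pvFuel edges k) m2 := by
  have h1 := pvCheck_iff edges online k m1 hpre
  have h2 := pvCheck_iff edges online k m2 hpre
  rw [Bool.eq_iff_iff, h1, h2]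
  constructor
  · rintro ⟨e, hg⟩; exact ⟨e, pvGrow_congr _ k m1 m2 0 0 _ e hcong hg⟩
  · rintro ⟨e, hg⟩
    exact ⟨e, pvGrow_congr _ k m2 m1 0 0 _ e (fun u q hq => (hcong u q hq).symm) hg⟩

-- ===== B-side lemmas: the Bellman-Ford fixpoint decides the same reachability =====

-- an edge is closed w.r.t. a distance map: its admissible relaxation adds nothing
def pvClosedAt (k limit : Int) (dist : PySem.Dict Int Int) (e : Int × Int × Int) : Prop :=
  ∀ dx, dist.get? e.1 = some dx → limit ≤ e.2.2 → dx + e.2.2 ≤ k →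
    ∃ dy, dist.get? e.2.1 = some dy ∧ dy ≤ dx + e.2.2

-- the invariant of B's relaxation loop
structure pvBInv (road : PySem.Dict Int (List (Int × Int))) (k limit : Int) (K : Nat)
    (dist : PySem.Dict Int Int) : Prop where
  vals : ∀ v d, dist.get? v = some d → 0 ≤ d ∧ d.toNat < K
  src  : ∀ v d, dist.get? v = some d → ∃ e, e ≤ d ∧ pvGrow road k limit 0 0 v e
  zero : ∃ d0, dist.get? 0 = some d0 ∧ d0 ≤ 0

-- a successful B relaxation keeps the invariant and strictly pays the potential
theorem pvInsertStep (edges : List (List Int)) (online : List Bool) (k limit : Int)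
    (K : Nat) (U : List Int) (hK : (max k 0).toNat < K)
    (hUdef : U = (0 : Int) :: pvTargets edges)
    (hpre : Pre_findMaxPathScore edges online k)
    (dist : PySem.Dict Int Int) (x y c dx : Int)
    (hroadm : (y, c) ∈ (pvBuildRoad edges online).getD x [])
    (hinv : pvBInv (pvBuildRoad edges online) k limit K dist)
    (hdx : dist.get? x = some dx) (h1 : limit ≤ c) (h2 : dx + c ≤ k)
    (himp : ∀ dy, dist.get? y = some dy → dx + c < dy) :
    pvBInv (pvBuildRoad edges online) k limit K (dist.insert y (dx + c)) ∧
      pvPhiB U K (dist.insert y (dx + c)) < pvPhiB U K dist := by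
  have hc0 : 0 ≤ c := pvRoadW edges online k hpre x (y, c) hroadm
  have hyU : y ∈ U := by
    rw [hUdef]
    exact pvRoadU edges online x (y, c) hroadm
  have hdxv := hinv.vals x dx hdx
  have hnt0 : 0 ≤ dx + c := by omega
  have hget : ∀ w, (dist.insert y (dx + c)).get? w =
      if w = y then some (dx + c) else dist.get? w :=
    fun w => PySem.Dict.get?_insert dist y w (dx + c)
  have hy0 : (0 : Int) ≠ y := by
    obtain ⟨d0, hd0, hle0⟩ := hinv.zero
    intro he
    have := himp d0 (he ▸ hd0)
    omega
  refine ⟨⟨?_, ?_, ?_⟩, ?_⟩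
  · -- vals
    intro v d hv
    rw [hget] at hv
    by_cases hvy : v = y
    · rw [if_pos hvy] at hv
      injection hv with hd
      subst hd
      refine ⟨hnt0, ?_⟩
      have h9 : (dx + c).toNat ≤ (max k 0).toNat := Int.toNat_le_toNat (by omega)
      omega
    · rw [if_neg hvy] at hv
      exact hinv.vals v d hv
  · -- src
    intro v d hv
    rw [hget] at hv
    by_cases hvy : v = y
    · rw [if_pos hvy] at hv
      injection hv with hd
      subst hvy hd
      obtain ⟨e, hle, hg⟩ := hinv.src x dx hdx
      exact ⟨e + c, by omega, pvGrow.step hg hroadm h1 (by omega)⟩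
    · rw [if_neg hvy] at hv
      exact hinv.src v d hv
  · -- zero
    obtain ⟨d0, hd0, hle0⟩ := hinv.zero
    exact ⟨d0, by rw [hget, if_neg hy0]; exact hd0, hle0⟩
  · -- potential
    unfold pvPhiB
    apply pvSumLt _ _ _ ?_ y hyU ?_
    · intro v hv
      unfold pvPhiF
      rw [hget v]
      by_cases hvy : v = y
      · rw [if_pos hvy, hvy]
        cases hdv : dist.get? y with
        | none =>
          show (dx + c).toNat ≤ K
          have h9 : (dx + c).toNat ≤ (max k 0).toNat := Int.toNat_le_toNat (by omega)
          omega
        | some dy =>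
          show (dx + c).toNat ≤ dy.toNat
          exact Int.toNat_le_toNat (le_of_lt (himp dy hdv))
      · rw [if_neg hvy]
    · unfold pvPhiF
      rw [hget y, if_pos rfl]
      cases hdv : dist.get? y with
      | none =>
        show (dx + c).toNat < K
        have h9 : (dx + c).toNat ≤ (max k 0).toNat := Int.toNat_le_toNat (by omega)
        omega
      | some dy =>
        show (dx + c).toNat < dy.toNat
        have := himp dy hdv
        omega

-- one B relaxation step either leaves the state untouched (and the edge is closed) or
-- sets the flag, keeps the invariant and strictly decreases the potential
theorem pvStep_cases (edges : List (List Int)) (online : List Bool) (k limit : Int)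
    (K : Nat) (U : List Int) (hK : (max k 0).toNat < K)
    (hUdef : U = (0 : Int) :: pvTargets edges)
    (hpre : Pre_findMaxPathScore edges online k)
    (s : PySem.Dict Int Int × Bool) (e : Int × Int × Int)
    (he : e ∈ pvAdj edges online)
    (hinv : pvBInv (pvBuildRoad edges online) k limit K s.1) :
    (pvStep k limit s e = s ∧ pvClosedAt k limit s.1 e) ∨
      ((pvStep k limit s e).2 = true ∧
        pvBInv (pvBuildRoad edges online) k limit K (pvStep k limit s e).1 ∧
        pvPhiB U K (pvStep k limit s e).1 < pvPhiB U K s.1) := by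
  obtain ⟨x, y, c⟩ := e
  have hroadm : (y, c) ∈ (pvBuildRoad edges online).getD x [] :=
    pvAdj_to_road edges online x y c he
  unfold pvStep pvClosedAt
  dsimp only
  by_cases h1 : c < limit
  · rw [if_pos h1]
    left
    exact ⟨rfl, fun dx _ hl _ => absurd hl (by omega)⟩
  · rw [if_neg h1]
    cases hdx : s.1.get? x with
    | none =>
      left
      refine ⟨rfl, ?_⟩
      intro dx hdx' _ _
      cases hdx'
    | some dx =>
      dsimp only
      by_cases h2 : dx + c > k
      · rw [if_pos h2]
        left
        refine ⟨rfl, ?_⟩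
        intro dx' hdx' _ hk'
        injection hdx' with hh
        omega
      · rw [if_neg h2]
        cases hdy : s.1.get? y with
        | none =>
          dsimp only
          right
          refine ⟨rfl, ?_⟩
          have := pvInsertStep edges online k limit K U hK hUdef hpre s.1 x y c dx
            hroadm hinv hdx (by omega) (by omega)
            (fun dy hdy' => by rw [hdy] at hdy'; cases hdy')
          exact this
        | some dy =>
          dsimp only
          by_cases h3 : dx + c < dy
          · rw [if_pos h3]
            right
            refine ⟨rfl, ?_⟩
            have := pvInsertStep edges online k limit K U hK hUdef hpre s.1 x y c dx
              hroadm hinv hdx (by omega) (by omega)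
              (fun dy' hdy' => by rw [hdy] at hdy'; injection hdy' with hh; omega)
            exact this
          · rw [if_neg h3]
            left
            refine ⟨rfl, ?_⟩
            intro dx' hdx' _ _
            injection hdx' with hh
            subst hh
            exact ⟨dy, rfl, by omega⟩

-- a full pass over the edge list: invariant kept, potential never up, a raised flag pays
-- at least one unit, a clean flag means the pass was the identity and every edge is closed
theorem pvFoldB (edges : List (List Int)) (online : List Bool) (k limit : Int)
    (K : Nat) (U : List Int) (hK : (max k 0).toNat < K)
    (hUdef : U = (0 : Int) :: pvTargets edges)
    (hpre : Pre_findMaxPathScore edges online k) :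
    ∀ (l : List (Int × Int × Int)), (∀ e ∈ l, e ∈ pvAdj edges online) →
    ∀ (s : PySem.Dict Int Int × Bool),
      pvBInv (pvBuildRoad edges online) k limit K s.1 →
      pvBInv (pvBuildRoad edges online) k limit K (l.foldl (pvStep k limit) s).1 ∧
      pvPhiB U K (l.foldl (pvStep k limit) s).1 ≤ pvPhiB U K s.1 ∧
      (s.2 = true → (l.foldl (pvStep k limit) s).2 = true) ∧
      ((l.foldl (pvStep k limit) s).2 = true → s.2 = true ∨
        pvPhiB U K (l.foldl (pvStep k limit) s).1 < pvPhiB U K s.1) ∧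
      ((l.foldl (pvStep k limit) s).2 = false → l.foldl (pvStep k limit) s = s ∧
        ∀ e ∈ l, pvClosedAt k limit s.1 e) := by
  intro l
  induction l with
  | nil =>
    intro _ s hinv
    exact ⟨hinv, le_refl _, fun h => h, fun h => Or.inl h, fun _ => ⟨rfl, by simp⟩⟩
  | cons e rest ih =>
    intro hmem s hinv
    rw [List.foldl_cons]
    rcases pvStep_cases edges online k limit K U hK hUdef hpre s e
        (hmem e (List.mem_cons_self ..)) hinv with ⟨heq, hcl⟩ | ⟨hflag, hinv', hphi⟩
    · rw [heq]
      obtain ⟨A, B, E, C, D⟩ := ih (fun e' he' => hmem e' (List.mem_cons_of_mem _ he')) s hinv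
      refine ⟨A, B, E, C, ?_⟩
      intro h
      obtain ⟨hid, hcls⟩ := D h
      refine ⟨hid, ?_⟩
      intro e' he'
      rcases List.mem_cons.mp he' with he'' | he''
      · subst he''; exact hcl
      · exact hcls e' he''
    · obtain ⟨A, B, E, C, D⟩ := ih (fun e' he' => hmem e' (List.mem_cons_of_mem _ he'))
        (pvStep k limit s e) hinv'
      refine ⟨A, le_trans B (le_of_lt hphi), fun _ => E hflag, ?_, ?_⟩
      · intro _
        exact Or.inr (lt_of_le_of_lt B hphi)
      · intro h
        exact absurd (E hflag) (by rw [h]; simp)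

-- with enough fuel the fixpoint loop ends in a closed state satisfying the invariant
theorem pvIter_closed (edges : List (List Int)) (online : List Bool) (k limit : Int)
    (K : Nat) (U : List Int) (hK : (max k 0).toNat < K)
    (hUdef : U = (0 : Int) :: pvTargets edges)
    (hpre : Pre_findMaxPathScore edges online k) :
    ∀ (fuel : Nat) (dist : PySem.Dict Int Int),
      pvBInv (pvBuildRoad edges online) k limit K dist → pvPhiB U K dist < fuel →
      pvBInv (pvBuildRoad edges online) k limit K
          (pvIter (pvAdj edges online) k limit fuel dist) ∧
        ∀ e ∈ pvAdj edges online,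
          pvClosedAt k limit (pvIter (pvAdj edges online) k limit fuel dist) e := by
  intro fuel
  induction fuel with
  | zero => intro dist _ hphi; omega
  | succ fuel ih =>
    intro dist hinv hphi
    rw [pvIter]
    obtain ⟨A, B, E, C, D⟩ := pvFoldB edges online k limit K U hK hUdef hpre
      (pvAdj edges online) (fun _ he => he) (dist, false) hinv
    rw [pvRound] at *
    dsimp only at A B C D
    cases hr2 : ((pvAdj edges online).foldl (pvStep k limit) (dist, false)).2 with
    | false =>
      simp only [Bool.false_eq_true, if_false]
      obtain ⟨hid, hcls⟩ := D hr2
      rw [hid]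
      exact ⟨hinv, hcls⟩
    | true =>
      simp only [if_true]
      rcases C hr2 with h | h
      · cases h
      · exact ih _ A (by omega)

-- B's feasibility test decides reachability (any limit, on Pre_ inputs)
theorem pvFeas_iff (edges : List (List Int)) (online : List Bool) (k limit : Int)
    (hpre : Pre_findMaxPathScore edges online k) :
    (pvFeas (pvAdj edges online) (PySem.List.len online) k (pvFuel edges k) limit = true) ↔
      ∃ e, pvGrow (pvBuildRoad edges online) k limit 0 0 (PySem.List.len online - 1) e := by
  have hK : (max k 0).toNat < (max k 0).toNat + 1 := Nat.lt_succ_self _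
  set road := pvBuildRoad edges online with hroad
  set U : List Int := 0 :: pvTargets edges with hUdef
  set K : Nat := (max k 0).toNat + 1 with hKdef
  have hget0 : ∀ v : Int, (PySem.Dict.empty.insert (0 : Int) (0 : Int)).get? v =
      if v = 0 then some 0 else none := by
    intro v
    rw [PySem.Dict.get?_insert]
    by_cases hv : v = 0
    · rw [if_pos hv, if_pos hv]
    · rw [if_neg hv, if_neg hv, PySem.Dict.get?_empty]
  have hinv0 : pvBInv road k limit K (PySem.Dict.empty.insert 0 0) := by
    refine ⟨?_, ?_, ?_⟩
    · intro v d hv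
      rw [hget0] at hv
      by_cases hv0 : v = 0
      · rw [if_pos hv0] at hv
        injection hv with h
        subst h
        exact ⟨le_refl _, by omega⟩
      · rw [if_neg hv0] at hv; cases hv
    · intro v d hv
      rw [hget0] at hv
      by_cases hv0 : v = 0
      · rw [if_pos hv0] at hv
        injection hv with h
        subst hv0 h
        exact ⟨0, le_refl _, pvGrow.refl 0 0⟩
      · rw [if_neg hv0] at hv; cases hv
    · exact ⟨0, by rw [hget0]; simp, le_refl _⟩
  have hphi0 : pvPhiB U K (PySem.Dict.empty.insert 0 0) < pvFuel edges k := by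
    unfold pvPhiB
    have hterm : ∀ x ∈ U.map (pvPhiF K (PySem.Dict.empty.insert 0 0)), x ≤ K := by
      intro x hx
      obtain ⟨v, _, rfl⟩ := List.mem_map.mp hx
      unfold pvPhiF
      rw [hget0]
      by_cases hv : v = 0
      · rw [if_pos hv]; simp
      · rw [if_neg hv]
    have hsum := List.sum_le_card_nsmul _ K hterm
    rw [List.length_map] at hsum
    have hUlen : U.length ≤ edges.length + 1 := by
      have := List.length_filterMap_le
        (fun row => match row with | [_, y, _] => some y | _ => none) edges
      simp only [hUdef, List.length_cons]
      unfold pvTargets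
      omega
    have hfuel : pvFuel edges k = (edges.length + 2) * (K + 1) := by
      unfold pvFuel; rw [hKdef]
    have he1 : (edges.length + 2) * (K + 1) = (edges.length + 1) * K + K + edges.length + 2 := by
      ring
    have hsum2 : (U.map (pvPhiF K (PySem.Dict.empty.insert 0 0))).sum ≤ (edges.length + 1) * K := by
      calc (U.map (pvPhiF K (PySem.Dict.empty.insert 0 0))).sum ≤ U.length • K := hsum
        _ = U.length * K := smul_eq_mul _ _
        _ ≤ (edges.length + 1) * K := Nat.mul_le_mul_right K hUlen
    rw [hfuel, he1]
    omega
  obtain ⟨hinvF, hclF⟩ := pvIter_closed edges online k limit K U hK hUdef hpre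
    (pvFuel edges k) (PySem.Dict.empty.insert 0 0) hinv0 hphi0
  unfold pvFeas
  constructor
  · intro h
    obtain ⟨d, hd⟩ := Option.isSome_iff_exists.mp h
    obtain ⟨e, _, hg⟩ := hinvF.src _ d hd
    exact ⟨e, hg⟩
  · rintro ⟨e, hg⟩
    have hkeyed : ∀ v e', pvGrow road k limit 0 0 v e' →
        ∃ dv, (pvIter (pvAdj edges online) k limit (pvFuel edges k)
          (PySem.Dict.empty.insert 0 0)).get? v = some dv ∧ dv ≤ e' := by
      intro v e' hg'
      induction hg' with
      | refl => exact hinvF.zero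
      | @step v e1 w c1 hgrow hmem hc hk ihg =>
        obtain ⟨dv, hdv, hdvle⟩ := ihg
        have hadj : (v, w, c1) ∈ pvAdj edges online :=
          pvRoad_to_adj edges online v w c1 hmem
        have hcl' := hclF _ hadj
        dsimp only [pvClosedAt] at hcl'
        obtain ⟨dw, hdw, hdwle⟩ := hcl' dv hdv (by omega) (by omega)
        exact ⟨dw, hdw, by omega⟩
    obtain ⟨dt, hdt, _⟩ := hkeyed _ e hg
    rw [hdt]
    rfl

-- the two feasibility tests agree
theorem pvFeas_eq_check (edges : List (List Int)) (online : List Bool) (k : Int)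
    (hpre : Pre_findMaxPathScore edges online k) (limit : Int) :
    pvFeas (pvAdj edges online) (PySem.List.len online) k (pvFuel edges k) limit =
      pvCheck (pvBuildRoad edges online) (PySem.List.len online) k (pvFuel edges k) limit := by
  rw [Bool.eq_iff_iff, pvFeas_iff edges online k limit hpre,
    pvCheck_iff edges online k limit hpre]

-- the characterisation both outer loops are proven to satisfy
def pvGood (P : Int → Bool) (r : Int) : Prop :=
  (r = -1 ∧ P 0 = false) ∨
    (0 ≤ r ∧ r ≤ 1000000000 ∧ P r = true ∧ (r = 1000000000 ∨ P (r + 1) = false))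

theorem pvGood_unique (P : Int → Bool) (r s : Int)
    (hanti : ∀ m m' : Int, m' ≤ m → P m = true → P m' = true)
    (hr : pvGood P r) (hs : pvGood P s) : r = s := by
  have key : ∀ a b : Int, pvGood P a → pvGood P b → a < b → False := by
    intro a b ha hb hab
    rcases hb with ⟨hb1, hb2⟩ | ⟨hb0, hb1, hb2, hb3⟩
    · rcases ha with ⟨ha1, _⟩ | ⟨ha0, _, _, _⟩ <;> omega
    · rcases ha with ⟨ha1, ha2⟩ | ⟨ha0, ha1, ha2, ha3⟩
      · have := hanti b 0 hb0 hb2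
        rw [ha2] at this; cases this
      · rcases ha3 with h | h
        · omega
        · have := hanti b (a + 1) (by omega) hb2
          rw [h] at this; cases this
  rcases Int.lt_trichotomy r s with h | h | h
  · exact absurd (key r s hr hs h) (by simp)
  · exact h
  · exact absurd (key s r hs hr h) (by simp)
-- A's binary search satisfies the characterisation
theorem pvBsearch_good (road : PySem.Dict Int (List (Int × Int))) (n k : Int) (fuel : Nat)
    (start end_ : Int)
    (h0 : 0 ≤ start) (h1 : start ≤ end_ + 1) (h2 : end_ ≤ 1000000000)
    (h3 : start = 0 ∨ pvCheck road n k fuel (start - 1) = true)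
    (h4 : end_ = 1000000000 ∨ pvCheck road n k fuel (end_ + 1) = false) :
    pvGood (pvCheck road n k fuel) (pvBsearch road n k fuel start end_) := by
  fun_induction pvBsearch road n k fuel start end_ with
  | case1 start end_ hle middle hcheck ih =>
    have hmid := PySem.Int.floordiv_two_mid_bounds (lo := start) (hi := end_) hle
    refine ih (by omega) (by omega) h2 (Or.inr ?_) h4
    have hmm : middle + 1 - 1 = middle := by ring
    rw [hmm]; exact hcheck
  | case2 start end_ hle middle hcheck ih =>
    have hmid := PySem.Int.floordiv_two_mid_bounds (lo := start) (hi := end_) hle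
    refine ih h0 (by omega) (by omega) h3 (Or.inr ?_)
    have hmm : middle - 1 + 1 = middle := by ring
    rw [hmm]
    exact Bool.not_eq_true _ ▸ hcheck
  | case3 start end_ hle =>
    have hse : start = end_ + 1 := by omega
    by_cases hs0 : start = 0
    · left
      refine ⟨by omega, ?_⟩
      rcases h4 with h | h
      · omega
      · have he : end_ + 1 = 0 := by omega
        rw [he] at h; exact h
    · right
      rcases h3 with h | h
      · exact absurd h hs0
      · refine ⟨by omega, by omega, h, ?_⟩
        rcases h4 with h' | h'
        · left; omega
        · right
          have he : end_ + 1 = start - 1 + 1 := by omega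
          rw [he] at h'; exact h'

-- the candidate set is duplicate-free and contains exactly the cap and the
-- in-range row weights
theorem pvCands_nodup (edges : List (List Int)) : (pvCands edges).Nodup := by
  unfold pvCands
  suffices H : ∀ (rows : List (List Int)) (s : PySem.Set Int), s.Nodup →
      (rows.foldl (fun s row =>
        match row with
        | [_, _, c] => if 0 ≤ c ∧ c ≤ 1000000000 then PySem.Set.add s c else s
        | _ => s) s).Nodup by
    exact H edges _ (PySem.Set.nodup_ofList _)
  intro rows
  induction rows with
  | nil => intro s hs; exact hs
  | cons row rest ih =>
    intro s hs
    rw [List.foldl_cons]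
    apply ih
    rcases row with _ | ⟨x, r⟩
    · exact hs
    rcases r with _ | ⟨y, r⟩
    · exact hs
    rcases r with _ | ⟨c, r⟩
    · exact hs
    rcases r with _ | ⟨z, r⟩
    · dsimp only
      split
      · exact PySem.Set.nodup_add _ _ hs
      · exact hs
    · exact hs

theorem pvCands_mem (edges : List (List Int)) (w : Int) :
    w ∈ pvCands edges ↔ w = 1000000000 ∨
      ∃ x y, [x, y, w] ∈ edges ∧ 0 ≤ w ∧ w ≤ 1000000000 := by
  unfold pvCands
  suffices H : ∀ (rows : List (List Int)) (s : PySem.Set Int),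
      (w ∈ rows.foldl (fun s row =>
        match row with
        | [_, _, c] => if 0 ≤ c ∧ c ≤ 1000000000 then PySem.Set.add s c else s
        | _ => s) s ↔ w ∈ s ∨ ∃ x y, [x, y, w] ∈ rows ∧ 0 ≤ w ∧ w ≤ 1000000000) by
    rw [H edges _]
    constructor
    · rintro (h | h)
      · left; simpa [PySem.Set.mem_ofList] using h
      · right; exact h
    · rintro (h | h)
      · left; simp [PySem.Set.mem_ofList, h]
      · right; exact h
  intro rows
  induction rows with
  | nil => intro s; simp
  | cons row rest ih =>
    intro s
    rw [List.foldl_cons]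
    rcases row with _ | ⟨x, r⟩
    · rw [ih]; constructor
      · rintro (h | ⟨a, b, hm, hb⟩)
        · exact Or.inl h
        · exact Or.inr ⟨a, b, List.mem_cons_of_mem _ hm, hb⟩
      · rintro (h | ⟨a, b, hm, hb⟩)
        · exact Or.inl h
        · rcases List.mem_cons.mp hm with he | hm'
          · cases he
          · exact Or.inr ⟨a, b, hm', hb⟩
    rcases r with _ | ⟨y, r⟩
    · rw [ih]; constructor
      · rintro (h | ⟨a, b, hm, hb⟩)
        · exact Or.inl h
        · exact Or.inr ⟨a, b, List.mem_cons_of_mem _ hm, hb⟩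
      · rintro (h | ⟨a, b, hm, hb⟩)
        · exact Or.inl h
        · rcases List.mem_cons.mp hm with he | hm'
          · cases he
          · exact Or.inr ⟨a, b, hm', hb⟩
    rcases r with _ | ⟨c, r⟩
    · rw [ih]; constructor
      · rintro (h | ⟨a, b, hm, hb⟩)
        · exact Or.inl h
        · exact Or.inr ⟨a, b, List.mem_cons_of_mem _ hm, hb⟩
      · rintro (h | ⟨a, b, hm, hb⟩)
        · exact Or.inl h
        · rcases List.mem_cons.mp hm with he | hm'
          · cases he
          · exact Or.inr ⟨a, b, hm', hb⟩
    rcases r with _ | ⟨z, r⟩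
    · dsimp only
      by_cases hbc : 0 ≤ c ∧ c ≤ 1000000000
      · rw [if_pos hbc, ih]
        constructor
        · rintro (h | ⟨a, b, hm, hb⟩)
          · rcases (PySem.Set.mem_add _ _ _).mp h with h' | h'
            · exact Or.inl h'
            · subst h'
              exact Or.inr ⟨x, y, List.mem_cons_self .., hbc⟩
          · exact Or.inr ⟨a, b, List.mem_cons_of_mem _ hm, hb⟩
        · rintro (h | ⟨a, b, hm, hb⟩)
          · exact Or.inl ((PySem.Set.mem_add _ _ _).mpr (Or.inl h))
          · rcases List.mem_cons.mp hm with he | hm'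
            · injection he with _ he1
              injection he1 with _ he2
              injection he2 with he3 _
              subst he3
              exact Or.inl ((PySem.Set.mem_add _ _ _).mpr (Or.inr rfl))
            · exact Or.inr ⟨a, b, hm', hb⟩
      · rw [if_neg hbc, ih]
        constructor
        · rintro (h | ⟨a, b, hm, hb⟩)
          · exact Or.inl h
          · exact Or.inr ⟨a, b, List.mem_cons_of_mem _ hm, hb⟩
        · rintro (h | ⟨a, b, hm, hb⟩)
          · exact Or.inl h
          · rcases List.mem_cons.mp hm with he | hm'
            · injection he with _ he1
              injection he1 with _ he2
              injection he2 with he3 _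
              subst he3
              exact absurd hb hbc
            · exact Or.inr ⟨a, b, hm', hb⟩
    · rw [ih]; constructor
      · rintro (h | ⟨a, b, hm, hb⟩)
        · exact Or.inl h
        · exact Or.inr ⟨a, b, List.mem_cons_of_mem _ hm, hb⟩
      · rintro (h | ⟨a, b, hm, hb⟩)
        · exact Or.inl h
        · rcases List.mem_cons.mp hm with he | hm'
          · injection he with _ he1
            injection he1 with _ he2
            injection he2 with _ he4
            cases he4
          · exact Or.inr ⟨a, b, hm', hb⟩
-- B's scan over any strictly-descending candidate list covering the road weights below
-- the last failed threshold satisfies the characterisation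
theorem pvScanAux (edges : List (List Int)) (online : List Bool) (k : Int)
    (hpre : Pre_findMaxPathScore edges online k) :
    ∀ (C : List Int) (b : Int),
      C.Pairwise (fun a b => b < a) →
      (∀ c ∈ C, 0 ≤ c ∧ c ≤ 1000000000) →
      (∀ c ∈ C, c < b) →
      pvCheck (pvBuildRoad edges online) (PySem.List.len online) k (pvFuel edges k) b
        = false →
      (∀ w, (∃ u q, q ∈ (pvBuildRoad edges online).getD u [] ∧ q.2 = w) →
        0 ≤ w → w < b → w ∈ C) →
      pvGood (pvCheck (pvBuildRoad edges online) (PySem.List.len online) k (pvFuel edges k))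
        (pvScanB (pvAdj edges online) (PySem.List.len online) k (pvFuel edges k) C) := by
  intro C
  induction C with
  | nil =>
    intro b hpw hbd hlt hb hcover
    left
    refine ⟨rfl, ?_⟩
    have hcong := pvCheck_congr edges online k 0 b hpre ?_
    · rw [hcong]; exact hb
    · intro u q hq
      have hw0 : 0 ≤ q.2 := pvRoadW edges online k hpre u q hq
      constructor
      · intro _
        by_contra hby
        have : q.2 < b := by omega
        exact absurd (hcover q.2 ⟨u, q, hq, rfl⟩ hw0 this) (List.not_mem_nil)
      · intro _; exact hw0
  | cons c rest ih =>
    intro b hpw hbd hlt hb hcover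
    rw [pvScanB, pvFeas_eq_check edges online k hpre c]
    by_cases hc : pvCheck (pvBuildRoad edges online) (PySem.List.len online) k
        (pvFuel edges k) c = true
    · rw [if_pos hc]
      right
      have hbc := hbd c (List.mem_cons_self ..)
      refine ⟨hbc.1, hbc.2, hc, ?_⟩
      by_cases hcE : c = 1000000000
      · exact Or.inl hcE
      · right
        have hcong := pvCheck_congr edges online k (c + 1) b hpre ?_
        · rw [hcong]; exact hb
        · intro u q hq
          have hw0 : 0 ≤ q.2 := pvRoadW edges online k hpre u q hq
          have hcb : c < b := hlt c (List.mem_cons_self ..)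
          constructor
          · intro hcw
            by_contra hby
            have hwb : q.2 < b := by omega
            have := hcover q.2 ⟨u, q, hq, rfl⟩ hw0 hwb
            rcases List.mem_cons.mp this with he | hr
            · omega
            · have := List.pairwise_cons.mp hpw
              have := this.1 q.2 hr
              omega
          · intro hbw; omega
    · rw [if_neg hc]
      have hpw' := List.pairwise_cons.mp hpw
      refine ih c hpw'.2 (fun x hx => hbd x (List.mem_cons_of_mem _ hx))
        (fun x hx => hpw'.1 x hx) (Bool.not_eq_true _ ▸ hc) ?_
      intro w hw h0 hwc
      have hcb : c < b := hlt c (List.mem_cons_self ..)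
      have := hcover w hw h0 (by omega)
      rcases List.mem_cons.mp this with he | hr
      · omega
      · exact hr

-- B's scan over the sorted candidate set satisfies the characterisation
theorem pvScanB_good (edges : List (List Int)) (online : List Bool) (k : Int)
    (hpre : Pre_findMaxPathScore edges online k) :
    pvGood (pvCheck (pvBuildRoad edges online) (PySem.List.len online) k (pvFuel edges k))
      (pvScanB (pvAdj edges online) (PySem.List.len online) k (pvFuel edges k)
        (PySem.List.sorted (pvCands edges) (fun x => x) true)) := by
  set C := PySem.List.sorted (pvCands edges) (fun x => x) true with hC
  have hperm : C.Perm (pvCands edges) := PySem.List.sorted_perm _ _ _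
  have hmemC : ∀ w, w ∈ C ↔ (w = 1000000000 ∨
      ∃ x y, [x, y, w] ∈ edges ∧ 0 ≤ w ∧ w ≤ 1000000000) := by
    intro w
    rw [hperm.mem_iff]
    exact pvCands_mem edges w
  have hnodup : C.Nodup := hperm.nodup_iff.mpr (pvCands_nodup edges)
  have hge : C.Pairwise (fun a b => b ≤ a) :=
    PySem.List.sorted_pairwise_rev (pvCands edges) (fun x => x)
  have hpw : C.Pairwise (fun a b => b < a) := by
    have := List.Pairwise.and hge hnodup
    exact this.imp (fun h => lt_of_le_of_ne h.1 h.2.symm)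
  have hbd : ∀ c ∈ C, 0 ≤ c ∧ c ≤ 1000000000 := by
    intro c hc
    rcases (hmemC c).mp hc with h | ⟨x, y, _, hb⟩
    · omega
    · exact hb
  have hEC : (1000000000 : Int) ∈ C := (hmemC _).mpr (Or.inl rfl)
  have hcover : ∀ w, (∃ u q, q ∈ (pvBuildRoad edges online).getD u [] ∧ q.2 = w) →
      0 ≤ w → w < 1000000000 → w ∈ C := by
    rintro w ⟨u, q, hq, hw⟩ h0 hwE
    obtain ⟨x, y, c, hrow, hpe, _, _, _⟩ := pvBuildRoad_mem edges online u q hq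
    refine (hmemC w).mpr (Or.inr ⟨x, y, ?_, h0, by omega⟩)
    have hqc : q.2 = c := by rw [hpe]
    have hwc : w = c := by omega
    rw [hwc]
    exact hrow
  cases hCs : C with
  | nil => rw [hCs] at hEC; cases hEC
  | cons c0 rest =>
    have hc0E : c0 = 1000000000 := by
      rcases List.mem_cons.mp (hCs ▸ hEC) with h | h
      · omega
      · have := (hCs ▸ hpw)
        have h2 := (List.pairwise_cons.mp this).1 _ h
        have h3 := hbd c0 (hCs ▸ List.mem_cons_self ..)
        omega
    rw [pvScanB, pvFeas_eq_check edges online k hpre c0]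
    by_cases hc : pvCheck (pvBuildRoad edges online) (PySem.List.len online) k
        (pvFuel edges k) c0 = true
    · rw [if_pos hc]
      right
      exact ⟨by omega, by omega, hc, Or.inl hc0E⟩
    · rw [if_neg hc]
      have hpw' := List.pairwise_cons.mp (hCs ▸ hpw)
      refine pvScanAux edges online k hpre rest c0 hpw'.2
        (fun x hx => hbd x (hCs ▸ List.mem_cons_of_mem _ hx))
        (fun x hx => hpw'.1 x hx) (Bool.not_eq_true _ ▸ hc) ?_
      intro w hw h0 hwc
      have := hcover w hw h0 (by omega)
      rcases List.mem_cons.mp (hCs ▸ this) with he | hr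
      · omega
      · exact hr

-- ===== VERDICT (by name: the statement is the Claim_ definition above) =====
theorem findMaxPathScore_spec : Claim_equal_findMaxPathScore := by
  intro edges online k _hdom hpre
  unfold Spec_findMaxPathScore findMaxPathScore findMaxPathScore_alt
  have good1 := pvBsearch_good (pvBuildRoad edges online) (PySem.List.len online) k
    (pvFuel edges k) 0 1000000000 (le_refl 0) (by omega) (le_refl _)
    (Or.inl rfl) (Or.inl rfl)
  have good2 := pvScanB_good edges online k hpre
  exact pvGood_unique _ _ _
    (fun m m' hle h => pvCheck_anti edges online k m m' hpre hle h) good1 good2
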